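-- pv_equiv track=rewrite | github.com/SaqibRashid/Arabic-Text-Diacritization | Testing code/Testing.py | find_space
-- ===== SOURCE A (Python) =====
-- def find_space(s):
--     c = 0
--     lastX = -1
--     for x in range(len(s) - 1, 0, -1):
--         if s[x] == u' ':
--             c = c + 1
--             lastX = x
--             if c == 2:
--                 return x
--     return lastX
-- ===== SOURCE B (Python) =====
-- def find_space(s):
--     positions = [i for i in range(1, len(s)) if s[i] == ' ']
--     if len(positions) >= 2:
--         return positions[-2]
--     if positions:
--         return positions[-1]
--     return -1
-- ===== Notes on version B (the rewrite author's own statement) =====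
-- stated objective: simpler
-- what changed: Replaces A's reverse scan with a match counter and early exit by a forward comprehension collecting all space positions in range(1,len(s)) followed by direct tail indexing (positions[-2]/[-1]/-1).
import Mathlib
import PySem

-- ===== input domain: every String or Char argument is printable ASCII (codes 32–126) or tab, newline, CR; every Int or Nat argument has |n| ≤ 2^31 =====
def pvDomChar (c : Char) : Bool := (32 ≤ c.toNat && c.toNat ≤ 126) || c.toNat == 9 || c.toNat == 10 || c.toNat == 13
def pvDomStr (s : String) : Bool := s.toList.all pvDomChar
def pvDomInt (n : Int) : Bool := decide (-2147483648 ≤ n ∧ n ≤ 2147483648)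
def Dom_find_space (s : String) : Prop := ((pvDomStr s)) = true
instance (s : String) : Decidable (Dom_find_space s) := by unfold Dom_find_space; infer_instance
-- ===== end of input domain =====

-- B replaces A's reverse scan-with-counter-and-early-exit by a forward collection of all
-- space positions followed by tail indexing (simpler decomposition; same O(n) cost).

-- ===== PORT A =====
-- the for-loop of A: state (c, lastX); early return when the counter reaches 2
def fsGo (p : Int → Bool) : List Int → Int → Int → Int
  | [], _, lastX => lastX
  | x :: rest, c, lastX =>
    if p x then
      (if c + 1 = 2 then x else fsGo p rest (c + 1) x)
    else fsGo p rest c lastX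

def find_space (s : String) : Int :=
  fsGo (fun x => PySem.Str.pyGet? s x == some ' ')
    (PySem.List.pyRange (PySem.Str.len s - 1) 0 (-1)) 0 (-1)

-- ===== PORT B =====
-- tail selection of Source B: positions[-2] / positions[-1] / -1
def fsSelect (positions : List Int) : Int :=
  if positions.length ≥ 2 then (PySem.List.pyGet? positions (-2)).getD 0
  else if positions.length > 0 then (PySem.List.pyGet? positions (-1)).getD 0
  else -1

def find_space_alt (s : String) : Int :=
  fsSelect ((PySem.List.pyRange 1 (PySem.Str.len s) 1).filter
      (fun i => PySem.Str.pyGet? s i == some ' '))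

-- ===== PRECONDITION & SPEC =====
def Spec_find_space (s : String) (out : Int) : Prop := out = find_space_alt s
instance (s : String) (out : Int) : Decidable (Spec_find_space s out) := by unfold Spec_find_space; infer_instance

-- ===== CLAIM (what is proved, stated in full; the proofs are below) =====
def Claim_equal_find_space : Prop := ∀ (s : String), Dom_find_space s → Spec_find_space s (find_space s)

-- ===== LEMMAS AND PROOFS =====

-- once one space has been seen (c = 1, lastX = a), the loop returns the next match, else a
theorem fsGo_one (p : Int → Bool) (L : List Int) (a : Int) :
    fsGo p L 1 a = match L.filter p with | [] => a | b :: _ => b := by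
  induction L generalizing a with
  | nil => simp [fsGo]
  | cons x rest ih =>
    by_cases h : p x
    · simp [fsGo, h]
    · simp [fsGo, h, ih]

-- from the initial state, the loop returns the second match if any, else the only match, else -1
theorem fsGo_zero (p : Int → Bool) (L : List Int) :
    fsGo p L 0 (-1) =
      match L.filter p with | [] => (-1 : Int) | [a] => a | _ :: b :: _ => b := by
  induction L with
  | nil => simp [fsGo]
  | cons x rest ih =>
    by_cases h : p x
    · simp only [fsGo, h, if_true]
      rw [if_neg (by norm_num), show (0:Int)+1=1 from rfl, fsGo_one]
      rcases hf : rest.filter p with _ | ⟨b, t⟩ <;> simp [h, hf]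
    · simp [fsGo, h, ih]

-- tail selection from F coincides with the head cases of F.reverse
theorem tail_select (F : List Int) :
    fsSelect F
    = match F.reverse with | [] => (-1 : Int) | [a] => a | _ :: b :: _ => b := by
  unfold fsSelect
  rcases hr : F.reverse with _ | ⟨a, _ | ⟨b, t⟩⟩
  · have hF : F = [] := by simpa using congrArg List.reverse hr
    subst hF; simp
  · have hF : F = [a] := by
      have := congrArg List.reverse hr; simpa using this
    subst hF; simp [PySem.List.pyGet?_neg_one]
  · have hF : F = t.reverse ++ [b, a] := by
      have := congrArg List.reverse hr; simpa using this
    subst hF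
    have hlen : (t.reverse ++ [b, a]).length = t.length + 2 := by simp
    rw [if_pos (by omega)]
    rw [PySem.List.pyGet?_neg_ofNat _ 2 (by omega) (by omega)]
    simp

-- ===== VERDICT (by name: the statement is the Claim_ definition above) =====
theorem find_space_spec : Claim_equal_find_space := by
  intro s _
  unfold Spec_find_space find_space find_space_alt
  rw [PySem.List.pyRange_neg_one_eq_reverse,
      show (0 : Int) + 1 = 1 from rfl,
      show PySem.Str.len s - 1 + 1 = PySem.Str.len s from by ring,
      fsGo_zero, List.filter_reverse, tail_select]
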